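-- pv_equiv track=rewrite | github.com/alejandrorusso/mkdocstocanvas | scripts/canvas_processing.py | add_pygments_inline_styles
-- ===== SOURCE A (Python) =====
-- def add_pygments_inline_styles(html_content: str) -> str:
--     """Add inline styles for Pygments syntax highlighting (GitHub light theme)"""
--     pygments_styles = {
--         'class="c"': 'class="c" style="color: #6a737d; font-style: italic;"',
--         'class="k"': 'class="k" style="color: #d73a49; font-weight: 600;"',
--         'class="n"': 'class="n" style="color: #24292e;"',
--         'class="o"': 'class="o" style="color: #d73a49;"',
--         'class="p"': 'class="p" style="color: #24292e;"',
--         'class="cm"': 'class="cm" style="color: #6a737d; font-style: italic;"',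
--         'class="c1"': 'class="c1" style="color: #6a737d; font-style: italic;"',
--         'class="kc"': 'class="kc" style="color: #005cc5;"',
--         'class="kd"': 'class="kd" style="color: #d73a49; font-weight: 600;"',
--         'class="kn"': 'class="kn" style="color: #d73a49; font-weight: 600;"',
--         'class="kp"': 'class="kp" style="color: #d73a49; font-weight: 600;"',
--         'class="kr"': 'class="kr" style="color: #d73a49; font-weight: 600;"',
--         'class="kt"': 'class="kt" style="color: #005cc5; font-weight: 600;"',
--         'class="m"': 'class="m" style="color: #005cc5;"',
--         'class="s"': 'class="s" style="color: #032f62;"',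
--         'class="na"': 'class="na" style="color: #22863a;"',
--         'class="nb"': 'class="nb" style="color: #005cc5;"',
--         'class="nc"': 'class="nc" style="color: #6f42c1; font-weight: 600;"',
--         'class="no"': 'class="no" style="color: #005cc5;"',
--         'class="nd"': 'class="nd" style="color: #6f42c1;"',
--         'class="nf"': 'class="nf" style="color: #6f42c1; font-weight: 600;"',
--         'class="nn"': 'class="nn" style="color: #24292e;"',
--         'class="nt"': 'class="nt" style="color: #22863a;"',
--         'class="nv"': 'class="nv" style="color: #e36209;"',
--         'class="ow"': 'class="ow" style="color: #d73a49; font-weight: 600;"',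
--         'class="w"': 'class="w" style="color: #24292e;"',
--         'class="mf"': 'class="mf" style="color: #005cc5;"',
--         'class="mh"': 'class="mh" style="color: #005cc5;"',
--         'class="mi"': 'class="mi" style="color: #005cc5;"',
--         'class="mo"': 'class="mo" style="color: #005cc5;"',
--         'class="sb"': 'class="sb" style="color: #032f62;"',
--         'class="sc"': 'class="sc" style="color: #032f62;"',
--         'class="sd"': 'class="sd" style="color: #032f62;"',
--         'class="s2"': 'class="s2" style="color: #032f62;"',
--         'class="se"': 'class="se" style="color: #005cc5;"',
--         'class="sh"': 'class="sh" style="color: #032f62;"',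
--         'class="si"': 'class="si" style="color: #005cc5;"',
--         'class="sx"': 'class="sx" style="color: #032f62;"',
--         'class="sr"': 'class="sr" style="color: #032f62;"',
--         'class="s1"': 'class="s1" style="color: #032f62;"',
--         'class="ss"': 'class="ss" style="color: #032f62;"',
--     }
--
--     for old, new in pygments_styles.items():
--         html_content = html_content.replace(old, new)
--
--     return html_content
-- ===== SOURCE B (Python) =====
-- def add_pygments_inline_styles(html_content: str) -> str:
--     """Add inline styles for Pygments syntax highlighting (GitHub light theme).
--
--     The style table is stored inverted (style -> class names) and flattened
--     into a name-keyed dict; one left-to-right scan rewrites each class="xx"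
--     token in place instead of running 41 whole-string replace passes."""
--     groups = [
--         ('color: #6a737d; font-style: italic;', ['c', 'cm', 'c1']),
--         ('color: #d73a49; font-weight: 600;', ['k', 'kd', 'kn', 'kp', 'kr', 'ow']),
--         ('color: #24292e;', ['n', 'p', 'nn', 'w']),
--         ('color: #d73a49;', ['o']),
--         ('color: #005cc5;', ['kc', 'm', 'nb', 'no', 'mf', 'mh', 'mi', 'mo', 'se', 'si']),
--         ('color: #005cc5; font-weight: 600;', ['kt']),
--         ('color: #032f62;', ['s', 'sb', 'sc', 'sd', 's2', 'sh', 'sx', 'sr', 's1', 'ss']),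
--         ('color: #22863a;', ['na', 'nt']),
--         ('color: #6f42c1; font-weight: 600;', ['nc', 'nf']),
--         ('color: #6f42c1;', ['nd']),
--         ('color: #e36209;', ['nv']),
--     ]
--     styles = {name: sty for sty, names in groups for name in names}
--     out = []
--     i, n = 0, len(html_content)
--     while i < n:
--         if html_content.startswith('class="', i):
--             j = html_content.find('"', i + 7)
--             if j != -1:
--                 name = html_content[i + 7:j]
--                 sty = styles.get(name)
--                 if sty is not None:
--                     out.append('class="' + name + '" style="' + sty + '"')
--                     i = j + 1
--                     continue
--         out.append(html_content[i])
--         i += 1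
--     return ''.join(out)
-- ===== Notes on version B (the rewrite author's own statement) =====
-- stated objective: alternative
-- what changed: A runs 41 separate whole-string str.replace passes, one per Pygments class token; B stores the table inverted (style -> class names), flattens it into a name-keyed dict, and makes a single left-to-right scan that rewrites each class attribute it meets via one dict lookup.
import Mathlib
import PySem

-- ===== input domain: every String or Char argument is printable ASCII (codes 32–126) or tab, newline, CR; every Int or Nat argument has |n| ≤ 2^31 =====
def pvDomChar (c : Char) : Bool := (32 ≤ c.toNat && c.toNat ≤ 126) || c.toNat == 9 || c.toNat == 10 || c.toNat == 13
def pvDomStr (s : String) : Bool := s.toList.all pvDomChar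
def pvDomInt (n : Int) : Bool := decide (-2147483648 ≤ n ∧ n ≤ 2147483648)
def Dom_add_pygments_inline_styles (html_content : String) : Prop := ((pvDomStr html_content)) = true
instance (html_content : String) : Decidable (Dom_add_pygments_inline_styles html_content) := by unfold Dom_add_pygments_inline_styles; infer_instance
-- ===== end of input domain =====

-- B replaces A's 41 whole-string replace passes by one left-to-right scan over an
-- inverted (style -> class names) table flattened into a name-keyed lookup
-- (objective: alternative single-pass algorithm).

-- ===== PORT A =====
def pygments_styles : List (String × String) := [
  ("class=\"c\"", "class=\"c\" style=\"color: #6a737d; font-style: italic;\""),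
  ("class=\"k\"", "class=\"k\" style=\"color: #d73a49; font-weight: 600;\""),
  ("class=\"n\"", "class=\"n\" style=\"color: #24292e;\""),
  ("class=\"o\"", "class=\"o\" style=\"color: #d73a49;\""),
  ("class=\"p\"", "class=\"p\" style=\"color: #24292e;\""),
  ("class=\"cm\"", "class=\"cm\" style=\"color: #6a737d; font-style: italic;\""),
  ("class=\"c1\"", "class=\"c1\" style=\"color: #6a737d; font-style: italic;\""),
  ("class=\"kc\"", "class=\"kc\" style=\"color: #005cc5;\""),
  ("class=\"kd\"", "class=\"kd\" style=\"color: #d73a49; font-weight: 600;\""),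
  ("class=\"kn\"", "class=\"kn\" style=\"color: #d73a49; font-weight: 600;\""),
  ("class=\"kp\"", "class=\"kp\" style=\"color: #d73a49; font-weight: 600;\""),
  ("class=\"kr\"", "class=\"kr\" style=\"color: #d73a49; font-weight: 600;\""),
  ("class=\"kt\"", "class=\"kt\" style=\"color: #005cc5; font-weight: 600;\""),
  ("class=\"m\"", "class=\"m\" style=\"color: #005cc5;\""),
  ("class=\"s\"", "class=\"s\" style=\"color: #032f62;\""),
  ("class=\"na\"", "class=\"na\" style=\"color: #22863a;\""),
  ("class=\"nb\"", "class=\"nb\" style=\"color: #005cc5;\""),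
  ("class=\"nc\"", "class=\"nc\" style=\"color: #6f42c1; font-weight: 600;\""),
  ("class=\"no\"", "class=\"no\" style=\"color: #005cc5;\""),
  ("class=\"nd\"", "class=\"nd\" style=\"color: #6f42c1;\""),
  ("class=\"nf\"", "class=\"nf\" style=\"color: #6f42c1; font-weight: 600;\""),
  ("class=\"nn\"", "class=\"nn\" style=\"color: #24292e;\""),
  ("class=\"nt\"", "class=\"nt\" style=\"color: #22863a;\""),
  ("class=\"nv\"", "class=\"nv\" style=\"color: #e36209;\""),
  ("class=\"ow\"", "class=\"ow\" style=\"color: #d73a49; font-weight: 600;\""),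
  ("class=\"w\"", "class=\"w\" style=\"color: #24292e;\""),
  ("class=\"mf\"", "class=\"mf\" style=\"color: #005cc5;\""),
  ("class=\"mh\"", "class=\"mh\" style=\"color: #005cc5;\""),
  ("class=\"mi\"", "class=\"mi\" style=\"color: #005cc5;\""),
  ("class=\"mo\"", "class=\"mo\" style=\"color: #005cc5;\""),
  ("class=\"sb\"", "class=\"sb\" style=\"color: #032f62;\""),
  ("class=\"sc\"", "class=\"sc\" style=\"color: #032f62;\""),
  ("class=\"sd\"", "class=\"sd\" style=\"color: #032f62;\""),
  ("class=\"s2\"", "class=\"s2\" style=\"color: #032f62;\""),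
  ("class=\"se\"", "class=\"se\" style=\"color: #005cc5;\""),
  ("class=\"sh\"", "class=\"sh\" style=\"color: #032f62;\""),
  ("class=\"si\"", "class=\"si\" style=\"color: #005cc5;\""),
  ("class=\"sx\"", "class=\"sx\" style=\"color: #032f62;\""),
  ("class=\"sr\"", "class=\"sr\" style=\"color: #032f62;\""),
  ("class=\"s1\"", "class=\"s1\" style=\"color: #032f62;\""),
  ("class=\"ss\"", "class=\"ss\" style=\"color: #032f62;\"")]

def add_pygments_inline_styles (html_content : String) : String :=
  pygments_styles.foldl (fun acc p => PySem.Str.replace acc p.1 p.2) html_content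

-- ===== PORT B =====
-- the inverted table of Source B: style -> list of class names
def pvGroups : List (String × List String) := [
  ("color: #6a737d; font-style: italic;", ["c", "cm", "c1"]),
  ("color: #d73a49; font-weight: 600;", ["k", "kd", "kn", "kp", "kr", "ow"]),
  ("color: #24292e;", ["n", "p", "nn", "w"]),
  ("color: #d73a49;", ["o"]),
  ("color: #005cc5;", ["kc", "m", "nb", "no", "mf", "mh", "mi", "mo", "se", "si"]),
  ("color: #005cc5; font-weight: 600;", ["kt"]),
  ("color: #032f62;", ["s", "sb", "sc", "sd", "s2", "sh", "sx", "sr", "s1", "ss"]),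
  ("color: #22863a;", ["na", "nt"]),
  ("color: #6f42c1; font-weight: 600;", ["nc", "nf"]),
  ("color: #6f42c1;", ["nd"]),
  ("color: #e36209;", ["nv"])]

-- the dict comprehension {name: sty for sty, names in groups for name in names}
-- (association list in insertion order; names are pairwise distinct)
def pvFlat : List (String × String) :=
  pvGroups.flatMap (fun g => g.2.map (fun name => (name, g.1)))

-- styles.get(name): first match in the flattened association list
def pvLookup (name : List Char) : Option (List Char) :=
  (pvFlat.find? (fun p => p.1.toList == name)).map (fun p => p.2.toList)

def pvMarker : List Char := "class=\"".toList

-- the scanner of Source B: on 'class="' read to the next '"'; rewrite known names, else copy one char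
def pvScan : List Char → List Char
  | [] => []
  | c :: t =>
    let rest := t.drop 6
    let name := rest.takeWhile (· != '"')
    let dw := rest.dropWhile (· != '"')
    if h : pvMarker.isPrefixOf (c :: t) = true ∧ dw ≠ [] ∧ (pvLookup name).isSome = true then
      pvMarker ++ name ++ "\" style=\"".toList ++ (pvLookup name).get h.2.2 ++ ['"'] ++ pvScan dw.tail
    else
      c :: pvScan t
termination_by s => s.length
decreasing_by
  · have h1 : (List.dropWhile (fun x => x != '"') (t.drop 6)).length ≤ (t.drop 6).length :=
      List.length_dropWhile_le _ _
    have h2 : (t.drop 6).length ≤ t.length := by simp [List.length_drop]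
    have h3 : 0 < (List.dropWhile (fun x => x != '"') (t.drop 6)).length :=
      List.length_pos_iff.mpr h.2.1
    simp only [List.length_tail, List.length_cons]
    omega
  · simp

def add_pygments_inline_styles_alt (html_content : String) : String :=
  String.ofList (pvScan html_content.toList)

-- ===== PRECONDITION & SPEC =====
def Spec_add_pygments_inline_styles (html_content : String) (out : String) : Prop := out = add_pygments_inline_styles_alt html_content
instance (html_content : String) (out : String) : Decidable (Spec_add_pygments_inline_styles html_content out) := by unfold Spec_add_pygments_inline_styles; infer_instance

-- ===== CLAIM (what is proved, stated in full; the proofs are below) =====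
def Claim_equal_add_pygments_inline_styles : Prop := ∀ (html_content : String), Dom_add_pygments_inline_styles html_content → Spec_add_pygments_inline_styles html_content (add_pygments_inline_styles html_content)

-- ===== LEMMAS AND PROOFS =====


-- ---- a structural scanner equal to PySem.Chars.replace (for a nonempty pattern) ----

def pvReplGo (old new : List Char) : Nat → List Char → List Char
  | 0, l => l
  | _ + 1, [] => []
  | fuel + 1, c :: t =>
    if old.isPrefixOf (c :: t) then new ++ pvReplGo old new fuel ((c :: t).drop old.length)
    else c :: pvReplGo old new fuel t

def pvRepl (old new s : List Char) : List Char := pvReplGo old new s.length s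

theorem pvGo_eq (old new : List Char) :
    ∀ (fuel : Nat) (l acc : List Char),
      PySem.Chars.replace.go old new fuel l acc = acc.reverse ++ pvReplGo old new fuel l := by
  intro fuel
  induction fuel with
  | zero =>
    intro l acc
    rw [PySem.Chars.replace.go]
    cases l <;> simp [pvReplGo]
  | succ n ih =>
    intro l acc
    cases l with
    | nil => rw [PySem.Chars.replace.go]; simp [pvReplGo]; omega
    | cons c t =>
      rw [PySem.Chars.replace.go]
      by_cases hp : old.isPrefixOf (c :: t)
      · simp only [hp, if_true, pvReplGo, ih]
        simp
      · simp only [hp, if_false, pvReplGo, ih, Bool.false_eq_true]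
        simp

theorem pvReplace_eq (old new s : List Char) (ho : old ≠ []) :
    PySem.Chars.replace s old new = pvRepl old new s := by
  rw [PySem.Chars.replace]
  have : old.isEmpty = false := by simpa [List.isEmpty_iff] using ho
  simp [this, pvGo_eq, pvRepl]

theorem pvReplGo_fuel (old new : List Char) (ho : old ≠ []) :
    ∀ (fuel : Nat) (l : List Char), l.length ≤ fuel → pvReplGo old new fuel l = pvRepl old new l := by
  intro fuel
  induction fuel using Nat.strong_induction_on with
  | _ fuel ih =>
    match fuel, ih with
    | 0, _ => intro l hl; interval_cases hlen : l.length; · cases l <;> simp_all [pvReplGo, pvRepl]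
    | n + 1, ih =>
      intro l hl
      cases l with
      | nil => simp [pvReplGo, pvRepl]
      | cons c t =>
        have hol : 1 ≤ old.length := List.length_pos_iff.mpr ho
        by_cases hp : old.isPrefixOf (c :: t)
        · have hdrop : ((c :: t).drop old.length).length ≤ t.length := by
            simp [List.length_drop]; omega
          rw [show pvReplGo old new (n+1) (c :: t) =
                new ++ pvReplGo old new n ((c :: t).drop old.length) by simp [pvReplGo, hp]]
          rw [show pvRepl old new (c :: t) =
                new ++ pvReplGo old new t.length ((c :: t).drop old.length) by
              simp [pvRepl, List.length_cons, pvReplGo, hp]]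
          rw [ih n (by omega) _ (by simp at hl; omega),
              ih t.length (by simp at hl; omega) _ hdrop]
        · rw [show pvReplGo old new (n+1) (c :: t) = c :: pvReplGo old new n t by simp [pvReplGo, hp]]
          rw [show pvRepl old new (c :: t) = c :: pvReplGo old new t.length t by
              simp [pvRepl, List.length_cons, pvReplGo, hp]]
          rw [ih n (by omega) t (by simp at hl; omega),
              ih t.length (by simp at hl; omega) t le_rfl]

theorem pvRepl_nil (old new : List Char) : pvRepl old new [] = [] := rfl

theorem pvRepl_cons_pos (old new : List Char) (c : Char) (t : List Char) (ho : old ≠ [])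
    (hp : old.isPrefixOf (c :: t)) :
    pvRepl old new (c :: t) = new ++ pvRepl old new ((c :: t).drop old.length) := by
  have hol : 1 ≤ old.length := List.length_pos_iff.mpr ho
  rw [show pvRepl old new (c :: t) = new ++ pvReplGo old new t.length ((c :: t).drop old.length) by
      simp [pvRepl, List.length_cons, pvReplGo, hp]]
  rw [pvReplGo_fuel old new ho t.length _ (by simp [List.length_drop]; omega)]

theorem pvRepl_cons_neg (old new : List Char) (c : Char) (t : List Char)
    (hp : ¬ old.isPrefixOf (c :: t)) :
    pvRepl old new (c :: t) = c :: pvRepl old new t := by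
  cases old with
  | nil => simp at hp
  | cons o os =>
    rw [show pvRepl (o :: os) new (c :: t) = c :: pvReplGo (o :: os) new t.length t by
        simp [pvRepl, List.length_cons, pvReplGo, hp]]
    rw [pvReplGo_fuel (o :: os) new (by simp) t.length t le_rfl]


-- ---- tokens, fold of all 41 replaces, straddle-freedom, the suffix family ----

def pvFold (ks : List (List Char × List Char)) (s : List Char) : List Char :=
  ks.foldl (fun acc p => pvRepl p.1 p.2 acc) s

def pvPairs : List (List Char × List Char) :=
  pygments_styles.map (fun p => (p.1.toList, p.2.toList))

def pvTok (n : List Char) : List Char := pvMarker ++ n ++ ['"']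

def pvRep (n sty : List Char) : List Char :=
  pvMarker ++ n ++ "\" style=\"".toList ++ sty ++ ['"']

def pvNoStrad (v old : List Char) : Bool :=
  (v.drop (v.length + 1 - old.length)).tails.all (fun u => u.isEmpty || !(u.isPrefixOf old))

def pvSOK (v : List Char) : List (List Char × List Char) → Bool
  | [] => true
  | p :: ks => (!p.1.isEmpty && pvNoStrad v p.1) && pvSOK (pvRepl p.1 p.2 v) ks

-- nonempty proper suffix of some key
def pvSuffOK (t : List Char) : Prop :=
  ∃ q ∈ pvPairs, t ≠ [] ∧ t.length < q.1.length ∧ t <:+ q.1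

set_option maxRecDepth 8192 in
set_option maxHeartbeats 4000000 in
theorem pvPairs_mem : ∀ q ∈ pvPairs,
    pvFlat.any (fun p => q == (pvTok p.1.toList, pvRep p.1.toList p.2.toList)) = true := by
  decide

set_option maxRecDepth 8192 in
set_option maxHeartbeats 4000000 in
theorem pvKeys_len : ∀ p ∈ pvPairs, 2 ≤ p.1.length ∧ p.1.length ≤ 10 ∧ 33 ≤ p.2.length := by
  have h : pvPairs.all (fun p => decide (2 ≤ p.1.length) && (decide (p.1.length ≤ 10) &&
      decide (33 ≤ p.2.length))) = true := by decide
  intro p hp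
  have := List.all_eq_true.mp h p hp
  simp only [Bool.and_eq_true, decide_eq_true_eq] at this
  exact ⟨this.1, this.2.1, this.2.2⟩

theorem pvKeys_ne : ∀ p ∈ pvPairs, p.1 ≠ [] := by
  intro p hp
  have := (pvKeys_len p hp).1
  intro hnil; simp [hnil] at this

set_option maxRecDepth 8192 in
set_option maxHeartbeats 4000000 in
theorem pvSfx_rep : ∀ q ∈ pvPairs, ∀ τ, τ <:+ q.1.tail → τ ≠ [] → ∀ p ∈ pvPairs, ¬ τ <+: p.2 := by
  have h : pvPairs.all (fun q => q.1.tail.tails.all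
      (fun τ => τ.isEmpty || pvPairs.all (fun p => !(τ.isPrefixOf p.2)))) = true := by decide
  intro q hq τ hτ hne p hp hpre
  have h1 := List.all_eq_true.mp (List.all_eq_true.mp h q hq) τ ((List.mem_tails _ _).mpr hτ)
  rcases Bool.or_eq_true_iff.mp h1 with h2 | h2
  · exact hne (List.isEmpty_iff.mp h2)
  · have := List.all_eq_true.mp h2 p hp
    rw [← List.isPrefixOf_iff_prefix] at hpre
    simp [hpre] at this

set_option maxRecDepth 8192 in
set_option maxHeartbeats 4000000 in
theorem pvTok_fact : ∀ p ∈ pvFlat,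
    pvSOK (pvTok p.1.toList) pvPairs = true ∧
    pvFold pvPairs (pvTok p.1.toList) = pvRep p.1.toList p.2.toList := by
  have h : pvFlat.all (fun p => pvSOK (pvTok p.1.toList) pvPairs &&
      (pvFold pvPairs (pvTok p.1.toList) == pvRep p.1.toList p.2.toList)) = true := by decide
  intro p hp
  have := List.all_eq_true.mp h p hp
  exact ⟨(Bool.and_eq_true_iff.mp this).1, by simpa using (Bool.and_eq_true_iff.mp this).2⟩

set_option maxRecDepth 8192 in
set_option maxHeartbeats 4000000 in
theorem pvName_noquote : ∀ p ∈ pvFlat, ∀ c ∈ p.1.toList, (c != '"') = true := by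
  have h : pvFlat.all (fun p => p.1.toList.all (fun c => c != '"')) = true := by decide
  intro p hp
  exact fun c hc => List.all_eq_true.mp (List.all_eq_true.mp h p hp) c hc

-- ---- splitting a fold of replaces at a safe boundary ----

theorem pvNoStrad_spec (v old : List Char) (h : pvNoStrad v old = true) :
    ∀ u, u <:+ v → u ≠ [] → u.length < old.length → ¬ u <+: old := by
  intro u hu hne hlen hpre
  obtain ⟨r, hr⟩ := hu
  subst hr
  have hk : (r ++ u).length + 1 - old.length ≤ r.length := by simp; omega
  have hsub : u <:+ (r ++ u).drop ((r ++ u).length + 1 - old.length) := by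
    rw [List.drop_append_of_le_length hk]
    exact List.suffix_append _ _
  have hall := List.all_eq_true.mp h u ((List.mem_tails _ _).mpr hsub)
  rcases Bool.or_eq_true_iff.mp hall with h1 | h1
  · exact hne (List.isEmpty_iff.mp h1)
  · rw [← List.isPrefixOf_iff_prefix] at hpre
    simp [hpre] at h1

theorem pvRepl_append (old new : List Char) (ho : old ≠ []) :
    ∀ (v w : List Char), (∀ u, u <:+ v → u ≠ [] → u.length < old.length → ¬ u <+: old) →
      pvRepl old new (v ++ w) = pvRepl old new v ++ pvRepl old new w := by
  have main : ∀ (N : Nat) (v w : List Char), v.length ≤ N →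
      (∀ u, u <:+ v → u ≠ [] → u.length < old.length → ¬ u <+: old) →
      pvRepl old new (v ++ w) = pvRepl old new v ++ pvRepl old new w := by
    intro N
    induction N with
    | zero =>
      intro v w hv _
      cases v with
      | nil => simp [pvRepl_nil]
      | cons c t => simp at hv
    | succ N ih =>
      intro v w hv hNS
      cases v with
      | nil => simp [pvRepl_nil]
      | cons c t =>
        have hol : 1 ≤ old.length := List.length_pos_iff.mpr ho
        by_cases hp : old.isPrefixOf (c :: (t ++ w))
        · by_cases hlen : old.length ≤ (c :: t).length
          · have hpre : old <+: ((c :: t) ++ w) := by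
              simpa using List.isPrefixOf_iff_prefix.mp hp
            have hpv : old <+: (c :: t) := (List.isPrefix_append_of_length hlen).mp hpre
            have hpv' : old.isPrefixOf (c :: t) = true := List.isPrefixOf_iff_prefix.mpr hpv
            rw [List.cons_append, pvRepl_cons_pos old new c (t ++ w) ho hp,
                pvRepl_cons_pos old new c t ho hpv']
            have hdrop : (c :: (t ++ w)).drop old.length = (c :: t).drop old.length ++ w := by
              rw [show (c :: (t ++ w)) = (c :: t) ++ w from rfl]
              exact List.drop_append_of_le_length hlen
            rw [hdrop]
            rw [ih ((c :: t).drop old.length) w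
              (by simp [List.length_drop] at hv ⊢; omega)
              (fun u hu hne hul => hNS u (hu.trans (List.drop_suffix _ _)) hne hul)]
            simp
          · exfalso
            have hvo : (c :: t) <+: old := by
              obtain ⟨r, hr⟩ := List.isPrefixOf_iff_prefix.mp hp
              have h1 : (c :: t) = old.take (c :: t).length := by
                have h2 : List.take (c :: t).length (c :: (t ++ w)) = c :: t := by
                  rw [show (c :: (t ++ w)) = (c :: t) ++ w from rfl,
                      List.take_append_of_le_length le_rfl, List.take_length]
                have h3 := congrArg (fun l => List.take (c :: t).length l) hr
                simp only at h3
                rw [List.take_append_of_le_length (by omega)] at h3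
                rw [h3, h2]
              rw [h1]
              exact List.take_prefix _ _
            exact hNS (c :: t) List.suffix_rfl (by simp) (by omega) hvo
        · have hpv : ¬ old.isPrefixOf (c :: t) = true := by
            intro hx
            exact hp (List.isPrefixOf_iff_prefix.mpr
              (by simpa using (List.isPrefixOf_iff_prefix.mp hx).trans (List.prefix_append (c :: t) w)))
          rw [List.cons_append, pvRepl_cons_neg old new c (t ++ w) hp,
              pvRepl_cons_neg old new c t hpv]
          rw [ih t w (by simp at hv; omega)
            (fun u hu hne hul => hNS u (hu.trans (List.suffix_cons c t)) hne hul)]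
          simp
  intro v w hNS
  exact main v.length v w le_rfl hNS

theorem pvFold_step (p : List Char × List Char) (ks : List (List Char × List Char)) (s : List Char) :
    pvFold (p :: ks) s = pvFold ks (pvRepl p.1 p.2 s) := rfl

theorem pvFold_append : ∀ (ks : List (List Char × List Char)) (v w : List Char),
    pvSOK v ks = true → pvFold ks (v ++ w) = pvFold ks v ++ pvFold ks w := by
  intro ks
  induction ks with
  | nil => intro v w _; rfl
  | cons p ks ih =>
    intro v w h
    simp only [pvSOK, Bool.and_eq_true] at h
    have ho : p.1 ≠ [] := by simpa [List.isEmpty_iff] using h.1.1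
    rw [pvFold_step, pvFold_step, pvFold_step,
        pvRepl_append p.1 p.2 ho v w (pvNoStrad_spec v p.1 h.1.2)]
    exact ih _ _ h.2

-- ---- a replace pass cannot create a key occurrence: prefixes drawn from key suffixes are preserved ----

theorem pvPres1 : ∀ p ∈ pvPairs, ∀ (u τ : List Char), pvSuffOK τ →
    τ <+: pvRepl p.1 p.2 u → τ <+: u := by
  intro p hp
  have main : ∀ (N : Nat) (u : List Char), u.length ≤ N → ∀ τ, pvSuffOK τ →
      τ <+: pvRepl p.1 p.2 u → τ <+: u := by
    intro N
    induction N with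
    | zero =>
      intro u hu τ hτ hpre
      cases u with
      | nil => simpa [pvRepl_nil] using hpre
      | cons c t => simp at hu
    | succ N ih =>
      intro u hu τ hτ hpre
      cases u with
      | nil => simpa [pvRepl_nil] using hpre
      | cons c t =>
        have ho : p.1 ≠ [] := pvKeys_ne p hp
        by_cases hp1 : p.1.isPrefixOf (c :: t) = true
        · exfalso
          rw [pvRepl_cons_pos _ _ _ _ ho hp1] at hpre
          obtain ⟨q, hq, hτne, hτlen, hτsfx⟩ := hτ
          have hτlen' : τ.length ≤ p.2.length := by
            have h1 := hτsfx.length_le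
            have h2 := (pvKeys_len q hq).2.1
            have h3 := (pvKeys_len p hp).2.2
            omega
          have hτp2 : τ <+: p.2 := (List.isPrefix_append_of_length hτlen').mp hpre
          have hq1 : τ <:+ q.1.tail := by
            cases hq1 : q.1 with
            | nil => rw [hq1] at hτlen; simp at hτlen
            | cons a b =>
              rw [hq1] at hτsfx hτlen
              rcases List.suffix_cons_iff.mp hτsfx with he | hs
              · rw [he] at hτlen; simp at hτlen
              · simpa [hq1] using hs
          exact pvSfx_rep q hq τ hq1 hτne p hp hτp2
        · rw [pvRepl_cons_neg _ _ _ _ hp1] at hpre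
          cases τ with
          | nil => simp
          | cons e τ'
          · rcases List.cons_prefix_cons.mp hpre with ⟨he, hpre'⟩
            subst he
            cases hτ'e : τ' with
            | nil => exact List.cons_prefix_cons.mpr ⟨rfl, List.nil_prefix⟩
            | cons f τ''
            · have hτ'S : pvSuffOK τ' := by
                obtain ⟨q, hq, hne, hlen, hsfx⟩ := hτ
                refine ⟨q, hq, by simp [hτ'e], by simp at hlen; omega,
                  (List.tail_suffix (e :: τ')).trans hsfx⟩
              rw [← hτ'e]
              exact List.cons_prefix_cons.mpr ⟨rfl, ih t (by simp at hu; omega) τ' hτ'S hpre'⟩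
  intro u τ hτ hpre
  exact main u.length u le_rfl τ hτ hpre

theorem pvFold_cons : ∀ (ks : List (List Char × List Char)), (∀ p ∈ ks, p ∈ pvPairs) →
    ∀ (c : Char) (t : List Char), (∀ q ∈ pvPairs, ¬ q.1 <+: (c :: t)) →
    pvFold ks (c :: t) = c :: pvFold ks t := by
  intro ks
  induction ks with
  | nil => intros; rfl
  | cons p ks ih =>
    intro hks c t hNM
    have hpmem : p ∈ pvPairs := hks p List.mem_cons_self
    have hp1 : ¬ p.1.isPrefixOf (c :: t) = true := by
      intro hx
      exact hNM p hpmem (List.isPrefixOf_iff_prefix.mp hx)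
    have hstep : pvRepl p.1 p.2 (c :: t) = c :: pvRepl p.1 p.2 t :=
      pvRepl_cons_neg _ _ _ _ hp1
    have hNM' : ∀ q ∈ pvPairs, ¬ q.1 <+: (c :: pvRepl p.1 p.2 t) := by
      intro q hq hpre
      have hqlen := (pvKeys_len q hq).1
      cases hq1 : q.1 with
      | nil => rw [hq1] at hqlen; simp at hqlen
      | cons a b =>
        rw [hq1] at hpre
        rcases List.cons_prefix_cons.mp hpre with ⟨rfl, hpre'⟩
        cases hb : b with
        | nil => rw [hq1, hb] at hqlen; simp at hqlen
        | cons f g =>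
          have hbS : pvSuffOK b := by
            refine ⟨q, hq, by simp [hb], by rw [hq1]; simp, by rw [hq1]; exact List.suffix_cons a b⟩
          have hbt : b <+: t := pvPres1 p hpmem t b hbS hpre'
          exact hNM q hq (by rw [hq1]; exact List.cons_prefix_cons.mpr ⟨rfl, hbt⟩)
    rw [pvFold_step, pvFold_step, hstep]
    exact ih (fun q hq => hks q (List.mem_cons_of_mem p hq)) c _ hNM'

theorem pvFold_nil : ∀ (ks : List (List Char × List Char)), pvFold ks [] = [] := by
  intro ks
  induction ks with
  | nil => rfl
  | cons p ks ih => rw [pvFold_step, pvRepl_nil]; exact ih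

-- ---- reading a token off the front of the string ----

theorem pvTW (nm r : List Char) (h : ∀ ch ∈ nm, (ch != '"') = true) :
    (nm ++ '"' :: r).takeWhile (fun x => x != '"') = nm := by
  induction nm with
  | nil => simp
  | cons a l ih =>
    have ha : (a != '"') = true := h a List.mem_cons_self
    simp only [List.cons_append, List.takeWhile_cons, ha, if_true]
    rw [ih (fun ch hch => h ch (List.mem_cons_of_mem a hch))]

theorem pvDW (nm r : List Char) (h : ∀ ch ∈ nm, (ch != '"') = true) :
    (nm ++ '"' :: r).dropWhile (fun x => x != '"') = '"' :: r := by
  induction nm with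
  | nil => simp
  | cons a l ih =>
    have ha : (a != '"') = true := h a List.mem_cons_self
    simp only [List.cons_append, List.dropWhile_cons, ha, if_true]
    exact ih (fun ch hch => h ch (List.mem_cons_of_mem a hch))

theorem pvMarker_pre (c : Char) (t : List Char) (h : pvMarker.isPrefixOf (c :: t) = true) :
    c :: t = pvMarker ++ t.drop 6 := by
  obtain ⟨r, hr⟩ := List.isPrefixOf_iff_prefix.mp h
  have h7 : pvMarker.length = 7 := by decide
  have hrd : (c :: t).drop 7 = t.drop 6 := rfl
  have : r = t.drop 6 := by
    rw [← hrd, ← hr, ← h7, List.drop_left]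
  rw [← hr, this]

theorem pvTok_decomp (nm r : List Char) : pvTok nm ++ r = pvMarker ++ (nm ++ '"' :: r) := by
  simp [pvTok, List.append_assoc]

theorem pvDWhead (l : List Char) (dh : Char) (dtl : List Char)
    (h : l.dropWhile (fun x => x != '"') = dh :: dtl) : dh = '"' := by
  induction l with
  | nil => simp at h
  | cons a l ih =>
    rw [List.dropWhile_cons] at h
    by_cases ha : (a != '"') = true
    · rw [if_pos ha] at h; exact ih h
    · rw [if_neg ha] at h
      cases h
      simpa using ha

theorem pvScan_nil : pvScan [] = [] := by rw [pvScan]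

theorem pvScan_cons (c : Char) (t : List Char) :
    pvScan (c :: t) =
      if h : pvMarker.isPrefixOf (c :: t) = true ∧ (t.drop 6).dropWhile (· != '"') ≠ [] ∧
          (pvLookup ((t.drop 6).takeWhile (· != '"'))).isSome = true then
        pvMarker ++ (t.drop 6).takeWhile (· != '"') ++ "\" style=\"".toList ++
          (pvLookup ((t.drop 6).takeWhile (· != '"'))).get h.2.2 ++ ['"'] ++
          pvScan ((t.drop 6).dropWhile (· != '"')).tail
      else c :: pvScan t := by
  rw [pvScan]

-- ---- the main induction: 41 sequential replaces = one scan ----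

theorem pvMain : ∀ s : List Char, pvFold pvPairs s = pvScan s := by
  have main : ∀ (N : Nat) (s : List Char), s.length ≤ N → pvFold pvPairs s = pvScan s := by
    intro N
    induction N with
    | zero =>
      intro s hs
      cases s with
      | nil => rw [pvFold_nil, pvScan_nil]
      | cons c t => simp at hs
    | succ N ih =>
      intro s hs
      cases s with
      | nil => rw [pvFold_nil, pvScan_nil]
      | cons c t =>
        by_cases H : pvMarker.isPrefixOf (c :: t) = true ∧
            (t.drop 6).dropWhile (· != '"') ≠ [] ∧
            (pvLookup ((t.drop 6).takeWhile (· != '"'))).isSome = true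
        · obtain ⟨H1, H2, H3⟩ := H
          -- the looked-up entry
          cases hlk : pvLookup ((t.drop 6).takeWhile (· != '"')) with
          | none => rw [hlk] at H3; simp at H3
          | some sty =>
            obtain ⟨p₀, hfind, hsty⟩ := Option.map_eq_some_iff.mp hlk
            have hp₀mem : p₀ ∈ pvFlat := List.mem_of_find?_eq_some hfind
            have hp₀name : p₀.1.toList = (t.drop 6).takeWhile (· != '"') := by
              simpa using List.find?_some hfind
            -- decompose the input as token ++ rest
            cases hdwe : (t.drop 6).dropWhile (· != '"') with
            | nil => exact absurd hdwe H2
            | cons dh dtl =>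
              have hdh : dh = '"' := pvDWhead (t.drop 6) dh dtl hdwe
              subst hdh
              have hsplit : t.drop 6 =
                  ((t.drop 6).takeWhile (· != '"')) ++ '"' :: dtl := by
                conv_lhs => rw [← List.takeWhile_append_dropWhile
                  (p := fun x => x != '"') (l := t.drop 6)]
                rw [hdwe]
              have hct : c :: t = pvTok ((t.drop 6).takeWhile (· != '"')) ++ dtl := by
                rw [pvTok_decomp, ← hsplit]
                exact pvMarker_pre c t H1
              have hfact := pvTok_fact p₀ hp₀mem
              rw [hp₀name] at hfact
              have hdtl : dtl.length ≤ N := by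
                have := congrArg List.length hct
                simp [pvTok, pvMarker] at this
                simp at hs
                omega
              have hget : ∀ (hx : (pvLookup ((t.drop 6).takeWhile (· != '"'))).isSome = true),
                  (pvLookup ((t.drop 6).takeWhile (· != '"'))).get hx = sty := by
                intro hx
                simp [hlk]
              rw [pvScan_cons, dif_pos ⟨H1, H2, H3⟩, hget, hdwe]
              conv_lhs => rw [hct]
              rw [pvFold_append _ _ _ hfact.1, hfact.2, ih dtl hdtl, ← hsty, pvRep]
              simp [List.append_assoc]
        · -- no key matches at the head
          have hNM : ∀ q ∈ pvPairs, ¬ q.1 <+: (c :: t) := by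
            intro q hq hpre
            have hqform := pvPairs_mem q hq
            obtain ⟨p₀, hp₀, hq₀b⟩ := List.any_eq_true.mp hqform
            have hq₀ : q = (pvTok p₀.1.toList, pvRep p₀.1.toList p₀.2.toList) := by
              simpa using hq₀b
            obtain ⟨r, hr⟩ := hpre
            rw [hq₀] at hr
            simp only at hr
            have hr' : pvMarker ++ (p₀.1.toList ++ '"' :: r) = c :: t := by
              rw [← pvTok_decomp, hr]
            have hM : pvMarker.isPrefixOf (c :: t) = true :=
              List.isPrefixOf_iff_prefix.mpr ⟨p₀.1.toList ++ '"' :: r, hr'⟩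
            have hrest : t.drop 6 = p₀.1.toList ++ '"' :: r := by
              have := pvMarker_pre c t hM
              rw [← hr'] at this
              exact (List.append_cancel_left this).symm
            have hnq := pvName_noquote p₀ hp₀
            have hname : (t.drop 6).takeWhile (· != '"') = p₀.1.toList := by
              rw [hrest]; exact pvTW _ _ hnq
            have hdw : (t.drop 6).dropWhile (· != '"') = '"' :: r := by
              rw [hrest]; exact pvDW _ _ hnq
            refine H ⟨hM, by rw [hdw]; simp, ?_⟩
            rw [hname]
            have : (pvFlat.find? (fun p => p.1.toList == p₀.1.toList)).isSome = true := by
              rw [List.find?_isSome]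
              exact ⟨p₀, hp₀, by simp⟩
            simpa [pvLookup] using this
          rw [pvFold_cons pvPairs (fun q hq => hq : ∀ q ∈ pvPairs, q ∈ pvPairs) c t hNM,
              ih t (by simp at hs; omega)]
          rw [pvScan_cons, dif_neg H]
  intro s
  exact main s.length s le_rfl

-- ---- the String-level bridge for port A ----

theorem pvStrFold : ∀ (ps : List (String × String)) (s : String), (∀ p ∈ ps, p.1.toList ≠ []) →
    ps.foldl (fun acc p => PySem.Str.replace acc p.1 p.2) s =
    String.ofList ((ps.map (fun p => (p.1.toList, p.2.toList))).foldl
      (fun acc p => pvRepl p.1 p.2 acc) s.toList) := by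
  intro ps
  induction ps with
  | nil => intro s _; simp [String.ofList_toList]
  | cons p ps ih =>
    intro s h
    simp only [List.foldl_cons, List.map_cons]
    rw [ih (PySem.Str.replace s p.1 p.2) (fun q hq => h q (List.mem_cons_of_mem p hq))]
    have : (PySem.Str.replace s p.1 p.2).toList = pvRepl p.1.toList p.2.toList s.toList := by
      rw [PySem.Str.toList_replace, pvReplace_eq _ _ _ (h p List.mem_cons_self)]
    rw [this]

set_option maxRecDepth 8192 in
theorem pvStyles_keys_ne : ∀ p ∈ pygments_styles, p.1.toList ≠ [] := by
  have h : pygments_styles.all (fun p => !p.1.toList.isEmpty) = true := by decide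
  intro p hp
  simpa [List.isEmpty_iff] using List.all_eq_true.mp h p hp

-- ===== VERDICT (by name: the statement is the Claim_ definition above) =====
theorem add_pygments_inline_styles_spec : Claim_equal_add_pygments_inline_styles := by
  unfold Claim_equal_add_pygments_inline_styles Spec_add_pygments_inline_styles
  intro html_content _
  unfold add_pygments_inline_styles add_pygments_inline_styles_alt
  rw [pvStrFold pygments_styles html_content pvStyles_keys_ne]
  rw [show pygments_styles.map (fun p => (p.1.toList, p.2.toList)) = pvPairs from rfl]
  rw [show (pvPairs.foldl (fun acc p => pvRepl p.1 p.2 acc) html_content.toList) =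
      pvFold pvPairs html_content.toList from rfl]
  rw [pvMain]
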